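-- pv_equiv track=rewrite | github.com/dzlab/SocialCoupons | www/models/deal.py | constrainedSearchResult
-- ===== SOURCE A (Python) =====
-- def constrainedSearchResult(index, keywords, identifiers, limit):
--     result = []
--     for id in identifiers:
--         occurrence = 0
--         for word in keywords:
--             if word in index:
--                 if id in index[word]:
--                     occurrence = occurrence + 1
--         """Add this deal to query result if it is indexed by at least by 'limit' word from words of the user query"""
--         if occurrence >= limit:
--             result.append(id)
--     return result
-- ===== SOURCE B (Python) =====
-- def constrainedSearchResult(index, keywords, identifiers, limit):
--     counts = {}
--     for word in keywords:
--         if word in index: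
--             for id in set(index[word]):
--                 counts[id] = counts.get(id, 0) + 1
--     return [id for id in identifiers if counts.get(id, 0) >= limit]
-- ===== Notes on version B (the rewrite author's own statement) =====
-- stated objective: faster
-- what changed: Instead of rescanning every posting list for every identifier, B makes one pass over the keywords building an id->count table (counting each posting list's distinct ids once) and then filters the identifiers by their table count.
import Mathlib
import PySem

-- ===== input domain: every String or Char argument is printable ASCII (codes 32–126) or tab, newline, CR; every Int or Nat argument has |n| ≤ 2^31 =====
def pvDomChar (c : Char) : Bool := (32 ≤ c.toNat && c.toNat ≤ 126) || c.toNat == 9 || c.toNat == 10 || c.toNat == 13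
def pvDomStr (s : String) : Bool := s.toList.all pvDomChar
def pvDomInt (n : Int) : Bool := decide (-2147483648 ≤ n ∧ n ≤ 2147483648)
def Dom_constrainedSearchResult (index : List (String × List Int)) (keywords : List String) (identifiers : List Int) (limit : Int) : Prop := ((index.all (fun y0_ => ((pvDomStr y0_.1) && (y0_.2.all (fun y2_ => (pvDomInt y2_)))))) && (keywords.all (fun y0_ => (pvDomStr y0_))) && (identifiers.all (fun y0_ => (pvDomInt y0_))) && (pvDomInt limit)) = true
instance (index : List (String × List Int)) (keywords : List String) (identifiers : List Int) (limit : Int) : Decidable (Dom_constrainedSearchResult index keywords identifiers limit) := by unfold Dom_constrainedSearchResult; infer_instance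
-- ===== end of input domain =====

-- B replaces A's per-identifier rescan of every posting list by one pass over the
-- keywords that builds an id→count table, then filters the identifiers by that table.


-- ===== PORT A =====
-- the Python 'index' is a dict; 'word in index' / 'index[word]' is first-match lookup
def constrainedSearchResult (index : List (String × List Int)) (keywords : List String) (identifiers : List Int) (limit : Int) : List Int :=
  identifiers.foldl (fun result id =>
    let occurrence : Int := keywords.foldl (fun occurrence word =>
      match (PySem.Dict.mk index).get? word with
      | some ids => if id ∈ ids then occurrence + 1 else occurrence
      | none => occurrence) 0
    if occurrence ≥ limit then result ++ [id] else result) []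

-- ===== PORT B =====
def constrainedSearchResult_alt (index : List (String × List Int)) (keywords : List String) (identifiers : List Int) (limit : Int) : List Int :=
  let counts : PySem.Dict Int Int := keywords.foldl (fun counts word =>
    match (PySem.Dict.mk index).get? word with
    | some ids => (PySem.Set.ofList ids).foldl (fun counts id => counts.modify id 0 (· + 1)) counts
    | none => counts) PySem.Dict.empty
  identifiers.filter (fun id => counts.getD id 0 ≥ limit)

-- ===== PRECONDITION & SPEC =====
def Spec_constrainedSearchResult (index : List (String × List Int)) (keywords : List String) (identifiers : List Int) (limit : Int) (out : List Int) : Prop := out = constrainedSearchResult_alt index keywords identifiers limit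
instance (index : List (String × List Int)) (keywords : List String) (identifiers : List Int) (limit : Int) (out : List Int) : Decidable (Spec_constrainedSearchResult index keywords identifiers limit out) := by unfold Spec_constrainedSearchResult; infer_instance

-- ===== CLAIM (what is proved, stated in full; the proofs are below) =====
def Claim_equal_constrainedSearchResult : Prop := ∀ (index : List (String × List Int)) (keywords : List String) (identifiers : List Int) (limit : Int), Dom_constrainedSearchResult index keywords identifiers limit → Spec_constrainedSearchResult index keywords identifiers limit (constrainedSearchResult index keywords identifiers limit)

-- ===== LEMMAS AND PROOFS =====

-- A's inner occurrence loop started at n is n plus the loop started at 0.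
lemma occ_shift (index : List (String × List Int)) (id : Int) (ws : List String) (n : Int) :
    ws.foldl (fun occurrence word =>
      match (PySem.Dict.mk index).get? word with
      | some ids => if id ∈ ids then occurrence + 1 else occurrence
      | none => occurrence) n
    = n + ws.foldl (fun occurrence word =>
      match (PySem.Dict.mk index).get? word with
      | some ids => if id ∈ ids then occurrence + 1 else occurrence
      | none => occurrence) 0 := by
  induction ws generalizing n with
  | nil => simp
  | cons v vs ihv =>
    simp only [List.foldl_cons]
    rcases (PySem.Dict.mk index).get? v with _ | jds
    · exact ihv n
    · by_cases hm : id ∈ jds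
      · simp only [hm, if_true]
        rw [ihv (n + 1), ihv (0 + 1)]; ring
      · simp only [hm, if_false]
        exact ihv n

-- B's count table, read at id, is exactly A's inner occurrence count for id.
lemma counts_getD (index : List (String × List Int)) (keywords : List String) (id : Int)
    (d : PySem.Dict Int Int) :
    (keywords.foldl (fun counts word =>
      match (PySem.Dict.mk index).get? word with
      | some ids => (PySem.Set.ofList ids).foldl (fun counts id => counts.modify id 0 (· + 1)) counts
      | none => counts) d).getD id 0
    = d.getD id 0 + keywords.foldl (fun occurrence word =>
      match (PySem.Dict.mk index).get? word with
      | some ids => if id ∈ ids then occurrence + 1 else occurrence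
      | none => occurrence) 0 := by
  induction keywords generalizing d with
  | nil => simp
  | cons w ws ih =>
    simp only [List.foldl_cons]
    rcases (PySem.Dict.mk index).get? w with _ | ids
    · simp only []
      exact ih d
    · simp only []
      rw [ih, PySem.Dict.getD_foldl_modify_add_one]
      have hcnt : ((PySem.Set.ofList ids).count id : Int) = if id ∈ ids then 1 else 0 := by
        rw [List.Nodup.count (PySem.Set.nodup_ofList ids)]
        simp [PySem.Set.mem_ofList]
      by_cases hm : id ∈ ids
      · simp only [hm, if_true]
        rw [occ_shift index id ws (0 + 1), hcnt]; simp [hm]; ring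
      · simp only [hm, if_false]
        rw [hcnt]; simp [hm]

-- ===== VERDICT (by name: the statement is the Claim_ definition above) =====
theorem constrainedSearchResult_spec : Claim_equal_constrainedSearchResult := by
  intro index keywords identifiers limit _
  unfold Spec_constrainedSearchResult constrainedSearchResult constrainedSearchResult_alt
  simp only []
  show identifiers.foldl (fun result id =>
      if keywords.foldl (fun occurrence word =>
          match (PySem.Dict.mk index).get? word with
          | some ids => if id ∈ ids then occurrence + 1 else occurrence
          | none => occurrence) 0 ≥ limit
      then result ++ [id] else result) []
    = identifiers.filter (fun id =>
        (keywords.foldl (fun counts word =>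
          match (PySem.Dict.mk index).get? word with
          | some ids => (PySem.Set.ofList ids).foldl (fun counts id => counts.modify id 0 (· + 1)) counts
          | none => counts) (PySem.Dict.empty : PySem.Dict Int Int)).getD id 0 ≥ limit)
  have hfun : (fun (result : List Int) (id : Int) =>
      if keywords.foldl (fun occurrence word =>
          match (PySem.Dict.mk index).get? word with
          | some ids => if id ∈ ids then occurrence + 1 else occurrence
          | none => occurrence) 0 ≥ limit
      then result ++ [id] else result)
    = (fun (result : List Int) (id : Int) =>
      if decide ((keywords.foldl (fun counts word =>
          match (PySem.Dict.mk index).get? word with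
          | some ids => (PySem.Set.ofList ids).foldl (fun counts id => counts.modify id 0 (· + 1)) counts
          | none => counts) (PySem.Dict.empty : PySem.Dict Int Int)).getD id 0 ≥ limit) = true
      then result ++ [id] else result) := by
    funext result id
    rw [counts_getD]
    simp only [PySem.Dict.getD_empty, zero_add]
    by_cases h : keywords.foldl (fun occurrence word =>
        match (PySem.Dict.mk index).get? word with
        | some ids => if id ∈ ids then occurrence + 1 else occurrence
        | none => occurrence) 0 ≥ limit <;> simp [h]
  rw [hfun, PySem.List.foldl_append_if_eq_filter]
  simp
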